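-- pv_equiv track=rewrite | github.com/wufangjie/leetcode | 535. Encode and Decode TinyURL.py | s2n
-- ===== SOURCE A (Python) =====
-- def s2n(string):
--     n = 0
--     for c in string:
--         d = ord(c)
--         n *= 10
--         if d <= 57:
--             n += d - 48
--         elif d <= 90:
--             n += d - 55 # 65 + 10
--         else:
--             n += d - 61 # 97 + 10 + 26
--     return n
-- ===== SOURCE B (Python) =====
-- def s2n(string):
--     def val(c):
--         d = ord(c)
--         if d <= 57:
--             return d - 48
--         if d <= 90:
--             return d - 55
--         return d - 61
--     vals = [val(c) for c in string]
--     L = len(vals)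
--     return sum(v * 10 ** (L - 1 - i) for i, v in enumerate(vals))
-- ===== Notes on version B (the rewrite author's own statement) =====
-- stated objective: alternative
-- what changed: Replaces A's interleaved Horner accumulation (n = n*10 + digit per iteration) with two separate passes: first map every character to its value, then sum the values with explicit positional powers 10**(L-1-i).
import Mathlib
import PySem

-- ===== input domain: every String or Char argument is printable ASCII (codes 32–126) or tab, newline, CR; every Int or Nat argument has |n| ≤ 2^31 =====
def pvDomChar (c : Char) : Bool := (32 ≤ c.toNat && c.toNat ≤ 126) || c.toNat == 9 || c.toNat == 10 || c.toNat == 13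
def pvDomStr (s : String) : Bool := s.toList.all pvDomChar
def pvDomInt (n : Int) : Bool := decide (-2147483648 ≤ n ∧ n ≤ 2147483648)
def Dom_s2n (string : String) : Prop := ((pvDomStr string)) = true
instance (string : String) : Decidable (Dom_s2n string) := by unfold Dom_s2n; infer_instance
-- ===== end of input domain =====

-- B replaces A's interleaved Horner accumulation with two passes: map chars to values, then a positional-power sum (objective: alternative decomposition).

-- ===== PORT A =====
def s2n (string : String) : Int :=
  string.toList.foldl (fun n c =>
    let d : Int := c.toNat
    let n' := n * 10
    if d ≤ 57 then n' + (d - 48)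
    else if d ≤ 90 then n' + (d - 55)
    else n' + (d - 61)) 0

-- ===== PORT B =====
def s2nVal (c : Char) : Int :=
  let d : Int := c.toNat
  if d ≤ 57 then d - 48
  else if d ≤ 90 then d - 55
  else d - 61

def s2n_alt (string : String) : Int :=
  let vals := string.toList.map s2nVal
  let L := vals.length
  ((vals.zipIdx).map (fun p => p.1 * (10 : Int) ^ (L - 1 - p.2))).sum

-- ===== PRECONDITION & SPEC =====
def Spec_s2n (string : String) (out : Int) : Prop := out = s2n_alt string
instance (string : String) (out : Int) : Decidable (Spec_s2n string out) := by unfold Spec_s2n; infer_instance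

-- ===== CLAIM (what is proved, stated in full; the proofs are below) =====
def Claim_equal_s2n : Prop := ∀ (string : String), Dom_s2n string → Spec_s2n string (s2n string)

-- ===== LEMMAS AND PROOFS =====

-- positional-power sum over indices starting at k, exponent computed from the final length L
theorem s2n_posSum_cons (v : Int) (t : List Int) (k L : ℕ) :
    (((v :: t).zipIdx k).map (fun p => p.1 * (10 : Int) ^ (L - 1 - p.2))).sum
      = v * (10 : Int) ^ (L - 1 - k) + ((t.zipIdx (k + 1)).map (fun p => p.1 * (10 : Int) ^ (L - 1 - p.2))).sum := by
  simp [List.zipIdx_cons]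

-- Horner fold equals the positional-weight sum (generalized over accumulator and index offset)
theorem s2n_horner (t : List Int) : ∀ (a : Int) (k : ℕ),
    t.foldl (fun n v => n * 10 + v) a
      = a * (10 : Int) ^ t.length
        + ((t.zipIdx k).map (fun p => p.1 * (10 : Int) ^ (k + t.length - 1 - p.2))).sum := by
  induction t with
  | nil => intro a k; simp
  | cons v t ih =>
    intro a k
    rw [List.foldl_cons, ih (a * 10 + v) (k + 1), s2n_posSum_cons]
    have h1 : k + (v :: t).length - 1 - k = t.length := by simp
    have h2 : ∀ p : Int × ℕ,
        p.1 * (10 : Int) ^ (k + 1 + t.length - 1 - p.2) = p.1 * (10 : Int) ^ (k + (v :: t).length - 1 - p.2) := by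
      intro p
      have : k + 1 + t.length - 1 - p.2 = k + (v :: t).length - 1 - p.2 := by
        simp only [List.length_cons]; omega
      rw [this]
    simp only [h1]
    rw [show ((t.zipIdx (k+1)).map (fun p => p.1 * (10 : Int) ^ (k + 1 + t.length - 1 - p.2)))
          = ((t.zipIdx (k+1)).map (fun p => p.1 * (10 : Int) ^ (k + (v :: t).length - 1 - p.2))) from
        List.map_congr_left (fun p _ => h2 p)]
    simp only [List.length_cons, pow_succ]
    ring

-- ===== VERDICT (by name: the statement is the Claim_ definition above) =====
theorem s2n_spec : Claim_equal_s2n := by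
  intro string _
  unfold Spec_s2n s2n s2n_alt
  have hfold : string.toList.foldl (fun n c =>
      let d : Int := c.toNat
      let n' := n * 10
      if d ≤ 57 then n' + (d - 48)
      else if d ≤ 90 then n' + (d - 55)
      else n' + (d - 61)) 0
      = (string.toList.map s2nVal).foldl (fun n v => n * 10 + v) 0 := by
    rw [List.foldl_map]
    apply PySem.List.foldl_congr_mem
    intro n c _
    simp only [s2nVal]
    split_ifs <;> ring
  rw [hfold, s2n_horner (string.toList.map s2nVal) 0 0]
  simp
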